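-- pv_equiv track=rewrite | github.com/nobe0716/problem_solving | codeforces/contests/1244/B. Rooms and Staircases.py | solve
-- ===== SOURCE A (Python) =====
-- def solve(n, s):
-- 	is_stairs = [s[x] == '1' for x in range(n)]
-- 	if not any(is_stairs):
-- 		return n
-- 	if is_stairs[0] or is_stairs[-1]:
-- 		return n * 2
-- 	else:
-- 		min_idx = max_idx = None
-- 		for i in range(n):
-- 			if not is_stairs[i]:
-- 				continue
-- 			if not min_idx:
-- 				min_idx = i
-- 			max_idx = i
--
-- 		return max(max_idx + 1, n - min_idx) * 2
-- ===== SOURCE B (Python) =====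
-- def solve(n, s):
--     best = 0
--     for i in range(n):
--         if s[i] == '1':
--             v = max(i + 1, n - i)
--             if v > best:
--                 best = v
--     return best * 2 if best else n
-- ===== Notes on version B (the rewrite author's own statement) =====
-- stated objective: simpler
-- what changed: Replaces A's boolean staircase list, any() test, first/last special-case branches and min/max-index loop by one pass keeping the running maximum of max(i+1, n-i) over staircase columns, returning best*2 or n.
import Mathlib
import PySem

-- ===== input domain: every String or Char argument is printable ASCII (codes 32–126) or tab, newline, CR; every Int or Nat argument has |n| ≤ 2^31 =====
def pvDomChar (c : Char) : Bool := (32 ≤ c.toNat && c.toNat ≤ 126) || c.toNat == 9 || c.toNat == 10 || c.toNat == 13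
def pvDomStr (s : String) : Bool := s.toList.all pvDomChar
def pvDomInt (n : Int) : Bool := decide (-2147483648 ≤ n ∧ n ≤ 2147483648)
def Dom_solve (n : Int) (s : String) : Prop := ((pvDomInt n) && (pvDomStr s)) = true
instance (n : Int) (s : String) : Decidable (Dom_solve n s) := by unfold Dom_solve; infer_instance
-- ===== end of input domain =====

-- B replaces A's boolean list, any() test, first/last special cases and min/max-index
-- loop by a single running-maximum pass (objective: simpler).

-- ===== PORT A =====
def solve (n : Int) (s : String) : Int :=
  let is_stairs : List Bool :=
    (PySem.List.pyRange 0 n 1).map (fun x => (PySem.Str.pyGet? s x).getD ' ' == '1')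
  if ¬ (is_stairs.any id) then n
  else if ((PySem.List.pyGet? is_stairs 0).getD false
           || (PySem.List.pyGet? is_stairs (-1)).getD false) then n * 2
  else
    -- min_idx = max_idx = None; for i in range(n): …
    let st : Option Int × Option Int :=
      (PySem.List.pyRange 0 n 1).foldl
        (fun (st : Option Int × Option Int) i =>
          if ¬ (PySem.List.pyGetD is_stairs i false) then st
          else
            -- 'if not min_idx' is true for None and for 0 (Python truthiness)
            (if st.1 = none ∨ st.1 = some 0 then some i else st.1, some i))
        (none, none)
    -- max_idx/min_idx have been set here (a staircase exists); .getD 0 is unreachable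
    max ((st.2.getD 0) + 1) (n - (st.1.getD 0)) * 2

-- ===== PORT B =====
def solve_alt (n : Int) (s : String) : Int :=
  let best :=
    (PySem.List.pyRange 0 n 1).foldl
      (fun best i =>
        if (PySem.Str.pyGet? s i).getD ' ' == '1' then
          if max (i + 1) (n - i) > best then max (i + 1) (n - i) else best
        else best) 0
  if best ≠ 0 then best * 2 else n

-- ===== PRECONDITION & SPEC =====
-- Pre_ excludes exactly the inputs on which A raises IndexError at s[x] (n > len(s)).
def Pre_solve (n : Int) (s : String) : Prop := n ≤ PySem.Str.len s
instance (n : Int) (s : String) : Decidable (Pre_solve n s) := by unfold Pre_solve; infer_instance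
def pvWitness_solve : Int × String := (4, "0110")
def Spec_solve (n : Int) (s : String) (out : Int) : Prop := out = solve_alt n s
instance (n : Int) (s : String) (out : Int) : Decidable (Spec_solve n s out) := by unfold Spec_solve; infer_instance

-- ===== CLAIM (what is proved, stated in full; the proofs are below) =====
def Claim_equal_solve : Prop := ∀ (n : Int) (s : String), Dom_solve n s → Pre_solve n s → Spec_solve n s (solve n s)

-- ===== LEMMAS AND PROOFS =====

-- A's loop body once the condition has been rewritten to a predicate on the index
def pvStepA (st : Option Int × Option Int) (i : Int) : Option Int × Option Int :=
  (if st.1 = none ∨ st.1 = some 0 then some i else st.1, some i)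

-- skip-fold over a list = fold over its filtered sublist
theorem pv_foldl_filter {β : Type} (p : Int → Bool) (g : β → Int → β) (L : List Int) (acc : β) :
    L.foldl (fun acc i => if p i then g acc i else acc) acc = (L.filter p).foldl g acc := by
  induction L generalizing acc with
  | nil => rfl
  | cons a t ih =>
    by_cases h : p a = true <;> simp [h, ih]

-- once min_idx is a nonzero index, A's loop keeps it and tracks the last element
theorem pv_afold_keep (t : List Int) (m x : Int) (hm : m ≠ 0) :
    t.foldl pvStepA (some m, some x) = (some m, some (t.getLastD x)) := by
  induction t generalizing x with
  | nil => rfl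
  | cons a t ih =>
    rw [List.foldl_cons, show pvStepA (some m, some x) a = (some m, some a) by
      simp [pvStepA, hm], ih a, List.getLastD_cons]

theorem pv_afold (a : Int) (t : List Int) (ha : a ≠ 0) :
    (a :: t).foldl pvStepA (none, none) = (some a, some (t.getLastD a)) := by
  rw [List.foldl_cons, show pvStepA (none, none) a = (some a, some a) by simp [pvStepA],
    pv_afold_keep t a a ha]

-- upper bound for a running-max fold
theorem pv_foldl_max_le (l : List Int) (c M : Int) (hc : c ≤ M) (h : ∀ y ∈ l, y ≤ M) :
    l.foldl max c ≤ M := by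
  induction l generalizing c with
  | nil => simpa using hc
  | cons a t ih =>
    rw [List.foldl_cons]
    exact ih (max c a) (max_le hc (h a (by simp))) (fun y hy => h y (by simp [hy]))

theorem pv_getLastD_mem (l : List Int) (d : Int) (h : l ≠ []) : l.getLastD d ∈ l := by
  induction l generalizing d with
  | nil => exact absurd rfl h
  | cons a t ih =>
    rw [List.getLastD_cons]
    cases t with
    | nil => simp
    | cons b u => exact List.mem_cons_of_mem a (ih a (by simp))

theorem pv_mem_le_getLastD (l : List Int) (hl : l.Pairwise (· < ·)) :
    ∀ x ∈ l, ∀ d : Int, x ≤ l.getLastD d := by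
  induction l with
  | nil => intro x hx; cases hx
  | cons a t ih =>
    intro x hx d
    rw [List.getLastD_cons]
    rcases List.mem_cons.mp hx with rfl | h
    · cases t with
      | nil => simp
      | cons b u =>
        have hab : x < b := List.rel_of_pairwise_cons hl (by simp)
        exact le_trans (le_of_lt hab)
          (ih (List.pairwise_cons.mp hl).2 b (by simp) x)
    · exact ih (List.pairwise_cons.mp hl).2 x h a

theorem pv_main (n : Int) (s : String) : solve n s = solve_alt n s := by
  by_cases hn : n ≤ 0
  · simp [solve, solve_alt, PySem.List.pyRange_one_eq_nil hn]
  replace hn : 0 < n := lt_of_not_ge hn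
  set p : Int → Bool := fun i => ((PySem.Str.pyGet? s i).getD ' ' == '1') with hp
  set L : List Int := PySem.List.pyRange 0 n 1 with hL
  have hmemL : ∀ i ∈ L, 0 ≤ i ∧ i < n := by
    intro i hi
    exact PySem.List.mem_pyRange_one.mp (by rwa [hL] at hi)
  -- rewrite A's inner fold to a filter fold
  have hAfold : L.foldl
      (fun (st : Option Int × Option Int) i =>
        if ¬ (PySem.List.pyGetD (L.map p) i false) then st
        else (if st.1 = none ∨ st.1 = some 0 then some i else st.1, some i))
      (none, none) = (L.filter p).foldl pvStepA (none, none) := by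
    rw [PySem.List.foldl_congr_mem L _
      (fun (st : Option Int × Option Int) i => if p i then pvStepA st i else st) (none, none)
      (by
        intro st i hi
        obtain ⟨h0, h1⟩ := hmemL i hi
        rw [hL, PySem.List.pyGetD_map_pyRange_of_nonneg p n i false h0 h1]
        cases hpi : p i <;> simp [hpi, pvStepA])]
    exact pv_foldl_filter p pvStepA L (none, none)
  -- rewrite B's fold to a max fold over the filtered list
  have hBfold : L.foldl
      (fun best i => if p i then
        (if max (i + 1) (n - i) > best then max (i + 1) (n - i) else best) else best) 0
      = ((L.filter p).map (fun i => max (i + 1) (n - i))).foldl max 0 := by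
    rw [pv_foldl_filter p
      (fun b i => if max (i + 1) (n - i) > b then max (i + 1) (n - i) else b) L 0,
      List.foldl_map]
    exact PySem.List.foldl_congr_mem (L.filter p) _ _ 0 (by
      intro acc x _
      by_cases hx : max (x + 1) (n - x) > acc
      · rw [if_pos hx]; exact (max_eq_right (le_of_lt hx)).symm
      · rw [if_neg hx]; exact (max_eq_left (not_lt.mp hx)).symm)
  -- the two guards of A
  have hguard0 : (PySem.List.pyGet? (L.map p) 0).getD false = p 0 := by
    rw [hL, PySem.List.pyGet?_zero, PySem.List.pyRange_one_cons (by omega)]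
    simp
  have hguard1 : (PySem.List.pyGet? (L.map p) (-1)).getD false = p (n - 1) := by
    rw [hL, PySem.List.pyGet?_neg_one, List.getLast?_map,
      show PySem.List.pyRange 0 n 1 = PySem.List.pyRange 0 (n-1) 1 ++ [n-1] by
        have := PySem.List.pyRange_one_succ_right (a := 0) (b := n - 1) (by omega)
        simpa using this]
    simp
  have hany : (L.map p).any id = L.any p := by simp
  have hmemF : ∀ x ∈ L.filter p, 0 ≤ x ∧ x < n ∧ p x := by
    intro x hx
    obtain ⟨h1, h2⟩ := List.mem_filter.mp hx
    exact ⟨(hmemL x h1).1, (hmemL x h1).2, h2⟩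
  have hsorted : (L.filter p).Pairwise (· < ·) :=
    List.Pairwise.filter p (by rw [hL]; exact PySem.List.pairwise_lt_pyRange_one 0 n)
  simp only [solve, solve_alt]
  rw [hany, hguard0, hguard1, hAfold, hBfold]
  set M := ((L.filter p).map (fun i => max (i + 1) (n - i))).foldl max 0 with hM
  by_cases hF : L.filter p = []
  · have hnone : L.any p = false := by
      rw [List.any_eq_false]
      intro x hx hpx
      have : x ∈ L.filter p := List.mem_filter.mpr ⟨hx, hpx⟩
      rw [hF] at this
      cases this
    rw [hM, hF]
    simp [hnone]
  obtain ⟨a, t, hFa⟩ := List.exists_cons_of_ne_nil hF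
  have haF : a ∈ L.filter p := by rw [hFa]; exact List.mem_cons_self
  have hub := PySem.List.le_foldl_max ((L.filter p).map (fun i => max (i + 1) (n - i))) 0
  have hMlb : ∀ x ∈ L.filter p, max (x + 1) (n - x) ≤ M :=
    fun x hx => hub.2 _ (List.mem_map_of_mem hx)
  have hMub : M ≤ n := by
    apply pv_foldl_max_le _ 0 n (le_of_lt hn)
    intro y hy
    obtain ⟨x, hx, rfl⟩ := List.mem_map.mp hy
    obtain ⟨h0, h1, _⟩ := hmemF x hx
    exact max_le (by omega) (by omega)
  have hMpos : 0 < M := by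
    have h0 := (hmemF a haF).1
    exact lt_of_lt_of_le (lt_of_lt_of_le (by omega) (le_max_left (a + 1) (n - a))) (hMlb a haF)
  have hanyT : L.any p = true := by
    obtain ⟨h1, h2⟩ := List.mem_filter.mp haF
    exact List.any_eq_true.mpr ⟨a, h1, h2⟩
  rw [hanyT, if_neg (by simp), if_pos (by omega : M ≠ 0)]
  by_cases hg : (p 0 || p (n - 1)) = true
  · rw [if_pos hg]
    have hnM : n ≤ M := by
      rcases Bool.or_eq_true_iff.mp hg with h | h
      · have h0F : (0 : Int) ∈ L.filter p :=
          List.mem_filter.mpr ⟨by rw [hL]; exact PySem.List.mem_pyRange_one.mpr ⟨le_refl 0, hn⟩, h⟩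
        exact le_trans (le_trans (by omega) (le_max_right (0 + 1) (n - 0))) (hMlb 0 h0F)
      · have h1F : (n - 1) ∈ L.filter p :=
          List.mem_filter.mpr ⟨by rw [hL]; exact PySem.List.mem_pyRange_one.mpr ⟨by omega, by omega⟩, h⟩
        exact le_trans (le_trans (by omega) (le_max_left (n - 1 + 1) (n - (n - 1)))) (hMlb (n - 1) h1F)
    have : M = n := le_antisymm hMub hnM
    omega
  · rw [if_neg hg]
    have hg' : p 0 = false ∧ p (n - 1) = false := by
      constructor <;> simp only [Bool.or_eq_true] at hg <;> push Not at hg <;>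
        simp [hg.1, hg.2]
    have ha0 : a ≠ 0 := by
      intro h
      have := (hmemF a haF).2.2
      rw [h, hg'.1] at this
      cases this
    rw [hFa, pv_afold a t ha0]
    have hlst : t.getLastD a ∈ L.filter p := by
      rw [hFa]
      have := pv_getLastD_mem (a :: t) 0 (List.cons_ne_nil a t)
      rwa [List.getLastD_cons] at this
    have hle_lst : ∀ x ∈ L.filter p, x ≤ t.getLastD a := by
      intro x hx
      have := pv_mem_le_getLastD (L.filter p) hsorted x hx 0
      rwa [hFa, List.getLastD_cons] at this
    have ha_le : ∀ x ∈ L.filter p, a ≤ x := by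
      intro x hx
      rw [hFa] at hx
      rcases List.mem_cons.mp hx with rfl | h
      · exact le_refl x
      · exact le_of_lt (List.rel_of_pairwise_cons (hFa ▸ hsorted) h)
    have hkey : max (t.getLastD a + 1) (n - a) = M := by
      apply le_antisymm
      · apply max_le
        · exact le_trans (le_max_left _ (n - t.getLastD a)) (hMlb _ hlst)
        · exact le_trans (le_max_right (a + 1) _) (hMlb a haF)
      · apply pv_foldl_max_le
        · have := (hmemF _ hlst).1
          exact le_trans (by omega) (le_max_left (t.getLastD a + 1) (n - a))
        · intro y hy
          obtain ⟨x, hx, rfl⟩ := List.mem_map.mp hy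
          have h1 := hle_lst x hx
          have h2 := ha_le x hx
          exact max_le (le_trans (by omega) (le_max_left (t.getLastD a + 1) (n - a)))
            (le_trans (by omega) (le_max_right (t.getLastD a + 1) (n - a)))
    simp only [Option.getD_some]
    omega

-- ===== VERDICT (by name: the statement is the Claim_ definition above) =====
theorem solve_spec : Claim_equal_solve := by
  intro n s _ _
  unfold Spec_solve
  exact pv_main n s
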